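-- pv_equiv track=rewrite | github.com/kfirsalo/Deep_ass4 | utils.py | build_suffix
-- ===== SOURCE A (Python) =====
-- def build_suffix(word):
--     # Function to build the 3 length suffix of a word
--     suff = ''
--     for i in range(-1, -4, -1):
--         try:
--             letter = word[i]
--             if letter.isnumeric():
--                 suff = 'DG' + suff  # convert the letter to 'DG' if it is a digit
--             else:
--                 suff = letter + suff
--         except IndexError:
--             suff = '_' + suff  # padding
--     return suff
-- ===== SOURCE B (Python) =====
-- def build_suffix(word):
--     # Function to build the 3 length suffix of a word
--     tail = word[-3:]
--     suff = '_' * (3 - len(tail))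
--     for letter in tail:
--         if letter.isnumeric():
--             suff += 'DG'
--         else:
--             suff += letter
--     return suff
-- ===== Notes on version B (the rewrite author's own statement) =====
-- stated objective: simpler
-- what changed: B slices the last three characters and builds the underscore padding up front from len(tail), then appends forward over the slice, instead of A's backward negative-index loop with try/except-IndexError prepending; no exception handling remains.
import Mathlib
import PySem

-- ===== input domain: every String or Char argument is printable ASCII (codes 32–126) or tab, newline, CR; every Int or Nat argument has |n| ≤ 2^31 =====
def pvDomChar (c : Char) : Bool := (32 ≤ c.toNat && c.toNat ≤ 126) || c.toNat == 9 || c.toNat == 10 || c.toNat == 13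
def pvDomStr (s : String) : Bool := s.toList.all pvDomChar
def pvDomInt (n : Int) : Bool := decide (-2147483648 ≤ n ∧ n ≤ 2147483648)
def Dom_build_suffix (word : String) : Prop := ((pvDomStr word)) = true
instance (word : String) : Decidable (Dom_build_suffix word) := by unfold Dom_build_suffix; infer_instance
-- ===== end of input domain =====

-- B replaces A's backward negative-index try/except loop by an up-front slice-and-pad with a
-- forward appending loop (objective: simpler). isnumeric = isdigit on the ASCII domain.

-- ===== PORT A =====
-- backward loop over i = -1, -2, -3; IndexError (pyGet? = none) pads with '_'
def build_suffix (word : String) : String :=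
  String.ofList ((PySem.List.pyRange (-1) (-4) (-1)).foldl
    (fun suff i =>
      match PySem.List.pyGet? word.toList i with
      | some letter =>
          (if PySem.Chars.isdigit letter then ['D', 'G'] else [letter]) ++ suff
      | none => '_' :: suff) [])

-- ===== PORT B =====
-- tail = word[-3:]; pad up front; forward append
def build_suffix_alt (word : String) : String :=
  let tail := PySem.List.slice word.toList (some (-3)) none
  let pad : List Char := List.replicate (3 - tail.length) '_'
  String.ofList (tail.foldl
    (fun suff letter =>
      suff ++ (if PySem.Chars.isdigit letter then ['D', 'G'] else [letter])) pad)

-- ===== PRECONDITION & SPEC =====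
def Spec_build_suffix (word : String) (out : String) : Prop := out = build_suffix_alt word
instance (word : String) (out : String) : Decidable (Spec_build_suffix word out) := by unfold Spec_build_suffix; infer_instance

-- ===== CLAIM (what is proved, stated in full; the proofs are below) =====
def Claim_equal_build_suffix : Prop := ∀ (word : String), Dom_build_suffix word → Spec_build_suffix word (build_suffix word)

-- ===== LEMMAS AND PROOFS =====

-- negative indexing only sees a suffix of the list
theorem pyGet?_neg_suffix (pre suf : List Char) (k : Nat) (h0 : 0 < k) (h : k ≤ suf.length) :
    PySem.List.pyGet? (pre ++ suf) (-(k : Int)) = suf[suf.length - k]? := by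
  rw [PySem.List.pyGet?_neg_natCast (pre ++ suf) k h0 (by simp; omega)]
  rw [List.length_append, List.getElem?_append_right (by omega)]
  congr 1
  omega

-- the range of A's loop, as a literal
theorem range_lit : PySem.List.pyRange (-1) (-4) (-1) = [-1, -2, -3] := by decide

theorem build_suffix_eq_alt (word : String) :
    build_suffix word = build_suffix_alt word := by
  unfold build_suffix build_suffix_alt
  rw [range_lit]
  rcases hrev : word.toList.reverse with _ | ⟨x, _ | ⟨y, _ | ⟨z, rs⟩⟩⟩ <;>
    have hl : word.toList = word.toList.reverse.reverse := (List.reverse_reverse _).symm <;>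
    rw [hrev] at hl <;> rw [hl]
  · decide
  · have h1 : PySem.List.pyGet? [x] (-1) = some x := by
      simpa using pyGet?_neg_suffix [] [x] 1 (by omega) (by simp)
    have h2 : PySem.List.pyGet? [x] (-2) = none := by
      rw [PySem.List.pyGet?_eq_none_iff]; simp [PySem.Raise.InRange]
    have h3 : PySem.List.pyGet? [x] (-3) = none := by
      rw [PySem.List.pyGet?_eq_none_iff]; simp [PySem.Raise.InRange]
    have hs : PySem.List.slice [x] (some (-3)) none = [x] := by
      simp [PySem.List.slice_some_none, PySem.List.clampIdx]
    simp [List.foldl, h1, h2, h3, hs]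
  · have h1 : PySem.List.pyGet? [y, x] (-1) = some x := by
      simpa using pyGet?_neg_suffix [] [y, x] 1 (by omega) (by simp)
    have h2 : PySem.List.pyGet? [y, x] (-2) = some y := by
      simpa using pyGet?_neg_suffix [] [y, x] 2 (by omega) (by simp)
    have h3 : PySem.List.pyGet? [y, x] (-3) = none := by
      rw [PySem.List.pyGet?_eq_none_iff]; simp [PySem.Raise.InRange]
    have hs : PySem.List.slice [y, x] (some (-3)) none = [y, x] := by
      simp [PySem.List.slice_some_none, PySem.List.clampIdx]
    simp [List.foldl, h1, h2, h3, hs]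
  · -- word ends in the three characters z, y, x
    have h1 : PySem.List.pyGet? (rs.reverse ++ [z, y, x]) (-1) = some x := by
      simpa using pyGet?_neg_suffix rs.reverse [z, y, x] 1 (by omega) (by simp)
    have h2 : PySem.List.pyGet? (rs.reverse ++ [z, y, x]) (-2) = some y := by
      simpa using pyGet?_neg_suffix rs.reverse [z, y, x] 2 (by omega) (by simp)
    have h3 : PySem.List.pyGet? (rs.reverse ++ [z, y, x]) (-3) = some z := by
      simpa using pyGet?_neg_suffix rs.reverse [z, y, x] 3 (by omega) (by simp)
    have hs : PySem.List.slice (rs.reverse ++ [z, y, x]) (some (-3)) none = [z, y, x] := by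
      rw [PySem.List.slice_from_neg_ofNat _ 3 (by omega)]
      simp
    simp only [List.reverse_cons, List.append_assoc, List.cons_append, List.nil_append] at *
    simp [List.foldl, h1, h2, h3, hs]

-- ===== VERDICT (by name: the statement is the Claim_ definition above) =====
theorem build_suffix_spec : Claim_equal_build_suffix := by
  intro word _
  exact build_suffix_eq_alt word
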